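-- pv_equiv track=rewrite | github.com/humlab/the_culture_of_international_relations | 3_text_analysis/NER_runner_CoreNLP.py | extract_entity_phrases
-- ===== SOURCE A (Python) =====
-- def extract_entity_phrases(data, classes=[ 'LOCATION', 'PERSON']):
--
--     # Extract entities of selected classes, add index to enable merge to phrases
--     entities = [ (i, word, wclass)
--         for (i, (word, wclass)) in enumerate(data) if classes is None or wclass in classes ]
--
--     # Merge adjacent entities having the same classifier
--     for i in range(len(entities) - 1, 0, -1):
--         if entities[i][0] == entities[i - 1][0] + 1 and entities[i][2] == entities[i - 1][2]:
--             entities[i - 1] = (entities[i - 1][0], entities[i - 1][1] + " " + entities[i][1], entities[i - 1][2])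
--             del entities[i]
--
--     # Remove index in returned data
--     return [ (word, wclass) for (i, word, wclass) in entities  ]
-- ===== SOURCE B (Python) =====
-- def extract_entity_phrases(data, classes=['LOCATION', 'PERSON']):
--     result = []
--     prev_i = None
--     for i, (word, wclass) in enumerate(data):
--         if classes is not None and wclass not in classes:
--             continue
--         if prev_i is not None and i == prev_i + 1 and result[-1][1] == wclass:
--             result[-1] = (result[-1][0] + " " + word, wclass)
--         else:
--             result.append((word, wclass))
--         prev_i = i
--     return result
-- ===== Notes on version B (the rewrite author's own statement) =====
-- stated objective: alternative
-- what changed: Replaced A's filter-then-backward loop with in-place list deletions by a single forward pass that merges each kept token into the last emitted phrase as it goes.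
import Mathlib
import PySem

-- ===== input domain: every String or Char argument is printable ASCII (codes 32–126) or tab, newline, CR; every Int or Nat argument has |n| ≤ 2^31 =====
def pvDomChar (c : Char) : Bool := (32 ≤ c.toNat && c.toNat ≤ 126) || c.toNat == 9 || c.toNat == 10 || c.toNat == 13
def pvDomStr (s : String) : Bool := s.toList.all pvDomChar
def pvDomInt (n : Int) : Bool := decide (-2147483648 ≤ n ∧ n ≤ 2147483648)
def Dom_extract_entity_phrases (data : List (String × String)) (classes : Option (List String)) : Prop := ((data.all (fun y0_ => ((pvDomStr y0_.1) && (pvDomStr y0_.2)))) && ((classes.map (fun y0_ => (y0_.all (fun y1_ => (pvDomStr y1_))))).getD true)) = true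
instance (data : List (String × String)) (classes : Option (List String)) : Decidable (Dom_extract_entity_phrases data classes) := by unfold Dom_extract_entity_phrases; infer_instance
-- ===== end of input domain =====

-- B is a single forward pass (incremental merge into the last emitted phrase) instead of
-- A's filter-then-backward in-place deletion loop; objective: alternative (same measured cost).
-- ===== PORT A =====
-- 'classes is None or wclass in classes'
def pvKeep (classes : Option (List String)) (wclass : String) : Bool :=
  match classes with
  | none => true
  | some cs => cs.contains wclass

-- one iteration of A's backward loop body at (positive) index i:
-- read entities[i] and entities[i-1], maybe overwrite entities[i-1] and delete entities[i]
def pvStepA (ents : List (Int × String × String)) (i : Nat) : List (Int × String × String) :=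
  match ents[i]?, ents[i - 1]? with
  | some e, some p =>
      if e.1 == p.1 + 1 && e.2.2 == p.2.2 then
        ((ents.set (i - 1) (p.1, p.2.1 ++ " " ++ e.2.1, p.2.2)).eraseIdx i)
      else ents
  | _, _ => ents

-- 'for i in range(len(entities) - 1, 0, -1)': i runs k, k-1, …, 1 (exact for this fixed range)
def pvLoopA (ents : List (Int × String × String)) : Nat → List (Int × String × String)
  | 0 => ents
  | Nat.succ k => pvLoopA (pvStepA ents (k + 1)) k

def extract_entity_phrases (data : List (String × String)) (classes : Option (List String)) : List (String × String) :=
  let entities := (PySem.List.enumerate data).filter (fun e => pvKeep classes e.2.2)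
  let merged := pvLoopA entities (entities.length - 1)
  merged.map (fun e => (e.2.1, e.2.2))

-- ===== PORT B =====
-- Source B's loop; 'result' is kept reversed (head = result[-1]), reversed on return.
def pvLoopB (classes : Option (List String)) :
    List (Int × String × String) → List (String × String) → Option Int → List (String × String)
  | [], acc, _ => acc.reverse
  | (i, w, c) :: rest, acc, prevI =>
      if pvKeep classes c then
        match prevI, acc with
        | some pi, (lw, lc) :: accRest =>
            if i == pi + 1 && lc == c then pvLoopB classes rest ((lw ++ " " ++ w, c) :: accRest) (some i)
            else pvLoopB classes rest ((w, c) :: acc) (some i)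
        | _, _ => pvLoopB classes rest ((w, c) :: acc) (some i)
      else pvLoopB classes rest acc prevI

def extract_entity_phrases_alt (data : List (String × String)) (classes : Option (List String)) : List (String × String) :=
  pvLoopB classes (PySem.List.enumerate data) [] none

-- ===== PRECONDITION & SPEC =====
def Spec_extract_entity_phrases (data : List (String × String)) (classes : Option (List String)) (out : List (String × String)) : Prop := out = extract_entity_phrases_alt data classes
instance (data : List (String × String)) (classes : Option (List String)) (out : List (String × String)) : Decidable (Spec_extract_entity_phrases data classes out) := by unfold Spec_extract_entity_phrases; infer_instance

-- ===== CLAIM (what is proved, stated in full; the proofs are below) =====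
def Claim_equal_extract_entity_phrases : Prop := ∀ (data : List (String × String)) (classes : Option (List String)), Dom_extract_entity_phrases data classes → Spec_extract_entity_phrases data classes (extract_entity_phrases data classes)

-- ===== LEMMAS AND PROOFS =====

-- recursive characterisation of A's backward merge loop
def pvMergeAdj : List (Int × String × String) → List (Int × String × String)
  | [] => []
  | [e] => [e]
  | p :: e :: rest =>
      match pvMergeAdj (e :: rest) with
      | h :: t =>
          if h.1 == p.1 + 1 && h.2.2 == p.2.2 then (p.1, p.2.1 ++ " " ++ h.2.1, p.2.2) :: t
          else p :: h :: t
      | [] => [p]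

-- forward merge (B's strategy, on the filtered indexed list); merged tuple carries the LAST index
def pvFwd : List (Int × String × String) → List (Int × String × String)
  | [] => []
  | [e] => [e]
  | e :: f :: rest =>
      if f.1 == e.1 + 1 && e.2.2 == f.2.2 then pvFwd ((f.1, e.2.1 ++ " " ++ f.2.1, e.2.2) :: rest)
      else e :: pvFwd (f :: rest)
  termination_by l => l.length

def pvPi (l : List (Int × String × String)) : List (String × String) :=
  l.map (fun e => (e.2.1, e.2.2))

theorem pvStepA_cons (p : Int × String × String) (es : List (Int × String × String)) (i : Nat) :
    pvStepA (p :: es) (i + 2) = p :: pvStepA es (i + 1) := by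
  unfold pvStepA
  simp only [show i + 2 - 1 = i + 1 from rfl, show i + 1 - 1 = i from rfl,
    List.getElem?_cons_succ]
  rcases es[i + 1]? with _ | e1 <;> rcases es[i]? with _ | e2 <;> try rfl
  simp only [List.set_cons_succ, List.eraseIdx_cons_succ]
  split <;> rfl

theorem pvLoopA_cons (k : Nat) (p : Int × String × String) (es : List (Int × String × String)) :
    pvLoopA (p :: es) (k + 1) = pvStepA (p :: pvLoopA es k) 1 := by
  induction k generalizing es with
  | zero => rfl
  | succ k ih =>
      show pvLoopA (pvStepA (p :: es) (k + 2)) (k + 1) = _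
      rw [pvStepA_cons, ih]
      conv_rhs => rw [show pvLoopA es (k + 1) = pvLoopA (pvStepA es (k + 1)) k from rfl]

theorem pvMergeAdj_head_shape (e : Int × String × String) (rest : List (Int × String × String)) :
    ∃ w t, pvMergeAdj (e :: rest) = (e.1, w, e.2.2) :: t := by
  induction rest generalizing e with
  | nil => exact ⟨e.2.1, [], rfl⟩
  | cons f rs ih =>
      obtain ⟨w, t, hw⟩ := ih f
      simp only [pvMergeAdj, hw]
      by_cases h : (f.1 = e.1 + 1 ∧ f.2.2 = e.2.2)
      · exact ⟨e.2.1 ++ " " ++ w, t, by simp [h.1, h.2]⟩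
      · refine ⟨e.2.1, (f.1, w, f.2.2) :: t, ?_⟩
        rw [if_neg (by simpa using h)]

theorem pvLoopA_eq_mergeAdj (ents : List (Int × String × String)) :
    pvLoopA ents (ents.length - 1) = pvMergeAdj ents := by
  induction ents with
  | nil => rfl
  | cons p es ih =>
      cases es with
      | nil => rfl
      | cons e rs =>
          have hlen : (p :: e :: rs).length - 1 = (e :: rs).length - 1 + 1 := by
            simp
          rw [hlen, pvLoopA_cons, ih]
          obtain ⟨w, t, hw⟩ := pvMergeAdj_head_shape e rs
          rw [hw]
          rw [show pvStepA (p :: (e.1, w, e.2.2) :: t) 1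
                = if ((e.1, w, e.2.2).1 == p.1 + 1 && (e.1, w, e.2.2).2.2 == p.2.2 : Bool)
                  then (p.1, p.2.1 ++ " " ++ w, p.2.2) :: t
                  else p :: (e.1, w, e.2.2) :: t from rfl]
          simp only [pvMergeAdj, hw]

-- prepending a word onto the head entity commutes with the merge
theorem pvMergeAdj_prepend_word (i : Int) (c v w : String) (rest : List (Int × String × String)) :
    pvMergeAdj ((i, v ++ w, c) :: rest) =
      (match pvMergeAdj ((i, w, c) :: rest) with
       | (j, u, d) :: t => (j, v ++ u, d) :: t
       | [] => []) := by
  cases rest with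
  | nil => rfl
  | cons f rs =>
      obtain ⟨u, t, hu⟩ := pvMergeAdj_head_shape f rs
      simp only [pvMergeAdj, hu]
      by_cases hcond : ((f.1 == i + 1 && f.2.2 == c) = true)
      · simp [hcond, String.append_assoc]
      · simp [hcond]

theorem pvPi_fwd_eq_mergeAdj (l : List (Int × String × String)) :
    pvPi (pvFwd l) = pvPi (pvMergeAdj l) := by
  induction l using pvFwd.induct with
  | case1 => simp [pvFwd, pvMergeAdj]
  | case2 e => simp [pvFwd, pvMergeAdj]
  | case3 e f rest hrel ih =>
      obtain ⟨i, ew, c⟩ := e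
      obtain ⟨j, fw, c'⟩ := f
      simp only [Bool.and_eq_true, beq_iff_eq] at hrel
      obtain ⟨hj, hc⟩ := hrel
      try simp only at hj hc
      subst hj hc
      rw [show pvFwd ((i, ew, c) :: (i + 1, fw, c) :: rest)
            = pvFwd ((i + 1, ew ++ " " ++ fw, c) :: rest) from by rw [pvFwd]; simp]
      rw [ih]
      rw [show ew ++ " " ++ fw = (ew ++ " ") ++ fw from rfl,
          pvMergeAdj_prepend_word (i + 1) c (ew ++ " ") fw rest]
      obtain ⟨u, t, hu⟩ := pvMergeAdj_head_shape (i + 1, fw, c) rest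
      simp only [pvMergeAdj, hu]
      simp [pvPi, String.append_assoc]
  | case4 e f rest hrel ih =>
      rw [show pvFwd (e :: f :: rest) = e :: pvFwd (f :: rest) from by
            rw [pvFwd]
            rw [if_neg (by simpa using hrel)]]
      obtain ⟨u, t, hu⟩ := pvMergeAdj_head_shape f rest
      simp only [pvMergeAdj, hu, pvPi, List.map_cons] at ih ⊢
      rw [ih]
      rw [if_neg ?_]
      · simp
      · intro h
        apply (by simpa using hrel : ¬(f.1 == e.1 + 1 && e.2.2 == f.2.2) = true)
        simp only [Bool.and_eq_true, beq_iff_eq] at h ⊢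
        simpa [hu] using ⟨h.1, h.2.symm⟩

-- B's loop with an open group (pi: its last original index, gw/gc: its word/class)
theorem pvLoopB_open (classes : Option (List String)) (l : List (Int × String × String))
    (accRest : List (String × String)) (pi : Int) (gw gc : String) :
    pvLoopB classes l ((gw, gc) :: accRest) (some pi) =
      accRest.reverse ++ pvPi (pvFwd ((pi, gw, gc) :: l.filter (fun e => pvKeep classes e.2.2))) := by
  induction l generalizing accRest pi gw gc with
  | nil => simp [pvLoopB, pvFwd, pvPi]
  | cons x rest ih =>
      obtain ⟨i, w, c⟩ := x
      by_cases hk : pvKeep classes c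
      · rw [pvLoopB]
        simp only [hk, if_true, List.filter_cons]
        try simp only [show pvKeep classes (i, w, c).2.2 = true from hk, if_true]
        by_cases hrel : (i == pi + 1 && gc == c : Bool)
        · have hc : gc = c := by simpa using (And.right (by simpa using hrel))
          have hi : i = pi + 1 := by simpa using (And.left (by simpa using hrel))
          rw [if_pos hrel, ih]
          rw [show pvFwd ((pi, gw, gc) :: (i, w, c) :: List.filter (fun e => pvKeep classes e.2.2) rest)
                = pvFwd ((i, gw ++ " " ++ w, gc) :: List.filter (fun e => pvKeep classes e.2.2) rest) from ?_]
          · subst hc; rfl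
          · rw [pvFwd]
            have : (i == pi + 1 && gc == c : Bool) = true := hrel
            rw [if_pos (by subst hc hi; simp)]
        · rw [if_neg hrel, ih]
          rw [show pvFwd ((pi, gw, gc) :: (i, w, c) :: List.filter (fun e => pvKeep classes e.2.2) rest)
                = (pi, gw, gc) :: pvFwd ((i, w, c) :: List.filter (fun e => pvKeep classes e.2.2) rest) from ?_]
          · simp [pvPi]
          · rw [pvFwd, if_neg (by simpa using hrel)]
      · rw [pvLoopB]
        simp only [hk, if_false, Bool.false_eq_true, List.filter_cons]
        try simp only [show pvKeep classes (i, w, c).2.2 = false by simpa using hk]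
        simpa using ih accRest pi gw gc

theorem pvLoopB_closed (classes : Option (List String)) (l : List (Int × String × String)) :
    pvLoopB classes l [] none = pvPi (pvFwd (l.filter (fun e => pvKeep classes e.2.2))) := by
  induction l with
  | nil => simp [pvLoopB, pvFwd, pvPi]
  | cons x rest ih =>
      obtain ⟨i, w, c⟩ := x
      by_cases hk : pvKeep classes c
      · rw [pvLoopB]
        simp only [hk, if_true, List.filter_cons]
        try simp only [show pvKeep classes (i, w, c).2.2 = true from hk, if_true]
        · simpa using pvLoopB_open classes rest [] i w c
        · intro _ _ _ _ h _; cases h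
      · rw [pvLoopB]
        simp only [hk, if_false, Bool.false_eq_true, List.filter_cons]
        try simp only [show pvKeep classes (i, w, c).2.2 = false by simpa using hk]
        · exact ih
        · intro _ _ _ _ h _; cases h

-- ===== VERDICT (by name: the statement is the Claim_ definition above) =====
theorem extract_entity_phrases_spec : Claim_equal_extract_entity_phrases := by
  intro data classes _
  show extract_entity_phrases data classes = extract_entity_phrases_alt data classes
  unfold extract_entity_phrases extract_entity_phrases_alt
  simp only [pvLoopB_closed, pvLoopA_eq_mergeAdj]
  exact (pvPi_fwd_eq_mergeAdj _).symm
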